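-- pv_equiv track=rewrite | github.com/okara83/Becoming-a-Data-Scientist | Data Science and Machine Learning/Machine-Learning-In-Python-THOROUGH/EXAMPLES/EDABIT/EXPERT/001_100/68_seating_students.py | seating_students
-- ===== SOURCE A (Python) =====
-- def seating_students(lst):
--
--     K, S, P = lst[0], lst[1:], []
--     a, b, c = [], [], []
--     for i in range((K-2)//2+1):
--         a.append([])
--         a[i].append(2*i+1)
--         a[i].append(2*i+2)
--     for i in range((K-4)//2+1):
--         b.append([])
--         b[i].append(2*i+1)
--         b[i].append(2*i+3)
--     for i in range((K-4)//2+1):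
--         c.append([])
--         c[i].append(2*i+2)
--         c[i].append(2*i+4)
--     D = (a+b+c)
--     for i in D:
--         if not i[0] in S:
--             if not i[1] in S:
--                 P.append(i)
--     return len(P)
-- ===== SOURCE B (Python) =====
-- def seating_students(lst):
--     K = lst[0]
--     occ = set(lst[1:])
--     total = 0
--     prev_top_free = prev_bot_free = None
--     for c in range(K // 2):  # full columns: seats 2c+1 (top) and 2c+2 (bottom)
--         top_free = (2 * c + 1) not in occ
--         bot_free = (2 * c + 2) not in occ
--         if top_free and bot_free:
--             total += 1
--         if prev_top_free and top_free:
--             total += 1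
--         if prev_bot_free and bot_free:
--             total += 1
--         prev_top_free, prev_bot_free = top_free, bot_free
--     return total
-- ===== Notes on version B (the rewrite author's own statement) =====
-- stated objective: simpler
-- what changed: Instead of building three explicit pair lists, concatenating them and filtering by repeated list membership, B marks occupied seats in a set once and makes a single pass over the columns of the 2-row grid, keeping the previous column's free flags and counting vertical and horizontal free pairs on the fly.
import Mathlib
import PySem

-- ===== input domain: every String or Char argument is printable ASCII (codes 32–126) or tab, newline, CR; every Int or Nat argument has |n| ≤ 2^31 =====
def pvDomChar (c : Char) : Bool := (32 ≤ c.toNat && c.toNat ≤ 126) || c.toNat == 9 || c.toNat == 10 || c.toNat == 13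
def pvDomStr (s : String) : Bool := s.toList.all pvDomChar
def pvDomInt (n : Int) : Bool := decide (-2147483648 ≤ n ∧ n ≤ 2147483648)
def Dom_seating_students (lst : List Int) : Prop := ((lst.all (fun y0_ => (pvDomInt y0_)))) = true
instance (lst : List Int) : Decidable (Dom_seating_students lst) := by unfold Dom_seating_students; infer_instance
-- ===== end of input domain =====

-- B replaces A's three pair-list builds plus membership filtering with one left-to-right
-- pass over the grid columns carrying the previous column's free flags (objective: simpler).

-- ===== PORT A =====
def seating_students (lst : List Int) : Int :=
  match lst with
  | [] => 0  -- lst[0] raises IndexError on []; excluded by Pre_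
  | K :: S =>
    let a := (PySem.List.pyRange 0 (PySem.Int.floordiv (K - 2) 2 + 1) 1).map
      (fun i => (2 * i + 1, 2 * i + 2))
    let b := (PySem.List.pyRange 0 (PySem.Int.floordiv (K - 4) 2 + 1) 1).map
      (fun i => (2 * i + 1, 2 * i + 3))
    let c := (PySem.List.pyRange 0 (PySem.Int.floordiv (K - 4) 2 + 1) 1).map
      (fun i => (2 * i + 2, 2 * i + 4))
    let D := a ++ b ++ c
    let P := D.foldl
      (fun acc p => if !(S.contains p.1) then (if !(S.contains p.2) then acc ++ [p] else acc) else acc)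
      ([] : List (Int × Int))
    (P.length : Int)

-- ===== PORT B =====
def seating_students_alt (lst : List Int) : Int :=
  match lst with
  | [] => 0  -- lst[0] raises IndexError on []; excluded by Pre_
  | K :: S =>
    let occ := PySem.Set.ofList S
    -- prev flags start as Python None, which is falsy in 'if prev and cur': ported as false
    let res := (PySem.List.pyRange 0 (PySem.Int.floordiv K 2) 1).foldl
      (fun (st : Int × Bool × Bool) c =>
        let tf := !(PySem.Set.contains occ (2 * c + 1))
        let bf := !(PySem.Set.contains occ (2 * c + 2))
        (st.1 + (if tf && bf then 1 else 0)
              + (if st.2.1 && tf then 1 else 0)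
              + (if st.2.2 && bf then 1 else 0), tf, bf))
      ((0 : Int), false, false)
    res.1

-- ===== PRECONDITION & SPEC =====
-- Pre_ excludes only the empty list, on which A raises IndexError (lst[0]).
def Pre_seating_students (lst : List Int) : Prop := lst ≠ []
instance (lst : List Int) : Decidable (Pre_seating_students lst) := by
  unfold Pre_seating_students; infer_instance
def pvWitness_seating_students : List Int := [6, 1, 4]

def Spec_seating_students (lst : List Int) (out : Int) : Prop := out = seating_students_alt lst
instance (lst : List Int) (out : Int) : Decidable (Spec_seating_students lst out) := by
  unfold Spec_seating_students; infer_instance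

-- ===== CLAIM (what is proved, stated in full; the proofs are below) =====
def Claim_equal_seating_students : Prop := ∀ (lst : List Int), Dom_seating_students lst → Pre_seating_students lst → Spec_seating_students lst (seating_students lst)

-- ===== LEMMAS AND PROOFS =====

-- top / bottom seat of column i is free
def pvTF (S : List Int) (i : Int) : Bool := !(S.contains (2 * i + 1))
def pvBF (S : List Int) (i : Int) : Bool := !(S.contains (2 * i + 2))

-- common closed form: free vertical pairs over n columns, free horizontal pairs over n-1 gaps
def pvCnt (S : List Int) (n : Int) : Int :=
  ((PySem.List.pyRange 0 n 1).countP (fun i => pvTF S i && pvBF S i) : Int)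
  + ((PySem.List.pyRange 0 (n - 1) 1).countP (fun i => pvTF S i && pvTF S (i + 1)) : Int)
  + ((PySem.List.pyRange 0 (n - 1) 1).countP (fun i => pvBF S i && pvBF S (i + 1)) : Int)

lemma pv_floordiv2_sub2 (K : Int) :
    PySem.Int.floordiv (K - 2) 2 + 1 = PySem.Int.floordiv K 2 := by
  rw [PySem.Int.floordiv_eq_ediv_of_pos (by norm_num),
    PySem.Int.floordiv_eq_ediv_of_pos (by norm_num)]
  omega

lemma pv_floordiv2_sub4 (K : Int) :
    PySem.Int.floordiv (K - 4) 2 + 1 = PySem.Int.floordiv K 2 - 1 := by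
  rw [PySem.Int.floordiv_eq_ediv_of_pos (by norm_num),
    PySem.Int.floordiv_eq_ediv_of_pos (by norm_num)]
  omega

lemma pv_contains_ofList (S : List Int) (x : Int) :
    PySem.Set.contains (PySem.Set.ofList S) x = S.contains x := by
  by_cases h : x ∈ S
  · have h1 : x ∈ PySem.Set.ofList S := (PySem.Set.mem_ofList S x).mpr h
    simp_all
  · have h1 : x ∉ PySem.Set.ofList S := fun hc => h ((PySem.Set.mem_ofList S x).mp hc)
    simp_all

-- A's value: its three filtered pair lists counted, with A's range bounds rewritten to K//2 and K//2 - 1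
lemma pv_A_val (K : Int) (S : List Int) :
    seating_students (K :: S) = pvCnt S (PySem.Int.floordiv K 2) := by
  simp only [seating_students]
  rw [pv_floordiv2_sub2, pv_floordiv2_sub4]
  have hfun : (fun (acc : List (Int × Int)) (p : Int × Int) =>
      if !(S.contains p.1) then (if !(S.contains p.2) then acc ++ [p] else acc) else acc)
    = (fun acc p => if (!(S.contains p.1) && !(S.contains p.2)) then acc ++ [p] else acc) := by
    funext acc p
    cases h1 : S.contains p.1 <;> cases h2 : S.contains p.2 <;> simp_all
  have e1 := List.countP_congr (l := PySem.List.pyRange 0 (PySem.Int.floordiv K 2) 1)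
    (p := fun i => !S.contains (2*i+1) && !S.contains (2*i+2))
    (q := fun i => pvTF S i && pvBF S i) (by intro i _; simp [pvTF, pvBF])
  have e2 := List.countP_congr (l := PySem.List.pyRange 0 (PySem.Int.floordiv K 2 - 1) 1)
    (p := fun i => !S.contains (2*i+1) && !S.contains (2*i+3))
    (q := fun i => pvTF S i && pvTF S (i+1)) (by
      intro i _
      have h3 : 2 * (i + 1) + 1 = 2 * i + 3 := by ring
      simp [pvTF, h3])
  have e3 := List.countP_congr (l := PySem.List.pyRange 0 (PySem.Int.floordiv K 2 - 1) 1)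
    (p := fun i => !S.contains (2*i+2) && !S.contains (2*i+4))
    (q := fun i => pvBF S i && pvBF S (i+1)) (by
      intro i _
      have h4 : 2 * (i + 1) + 2 = 2 * i + 4 := by ring
      simp [pvBF, h4])
  simp only [hfun, PySem.List.foldl_append_if_eq_filter, List.nil_append, List.filter_append,
    List.filter_map, List.length_append, List.length_map, ← List.countP_eq_length_filter,
    Function.comp_def, pvCnt]
  push_cast
  rw [e1, e2, e3]

-- one more column adds one candidate vertical pair and (for m ≥ 1) one candidate gap per row
lemma pvCnt_succ (S : List Int) (m : Nat) :
    pvCnt S ((m : Int) + 1) = pvCnt S m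
      + (if pvTF S m && pvBF S m then 1 else 0)
      + (if (if m = 0 then false else pvTF S ((m : Int) - 1)) && pvTF S m then 1 else 0)
      + (if (if m = 0 then false else pvBF S ((m : Int) - 1)) && pvBF S m then 1 else 0) := by
  unfold pvCnt
  have hm : (0:Int) ≤ (m:Int) := Int.natCast_nonneg m
  rw [show ((m:Int) + 1 - 1) = (m:Int) by ring]
  rw [PySem.List.pyRange_one_succ_right hm]
  cases m with
  | zero =>
    norm_num [PySem.List.pyRange_one_eq_nil]
  | succ k =>
    have hk : (0:Int) ≤ (k:Int) := Int.natCast_nonneg k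
    have h1 : ((k+1:Nat):Int) = (k:Int)+1 := by push_cast; ring
    rw [h1, PySem.List.pyRange_one_succ_right hk]
    simp only [List.countP_append, List.countP_cons, List.countP_nil,
      show ((k:Int)+1-1) = (k:Int) by ring]
    push_cast
    split_ifs <;> omega

-- loop invariant of B: after the first n columns the accumulator is pvCnt S n
-- and the carried flags are the free flags of column n-1 (false before the first column)
lemma pv_B_inv (S : List Int) (n : Nat) :
    ((PySem.List.pyRange 0 (n : Int) 1).foldl
      (fun (st : Int × Bool × Bool) c =>
        let tf := !(PySem.Set.contains (PySem.Set.ofList S) (2 * c + 1))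
        let bf := !(PySem.Set.contains (PySem.Set.ofList S) (2 * c + 2))
        (st.1 + (if tf && bf then 1 else 0)
              + (if st.2.1 && tf then 1 else 0)
              + (if st.2.2 && bf then 1 else 0), tf, bf))
      ((0 : Int), false, false))
    = (pvCnt S n, (if n = 0 then false else pvTF S ((n : Int) - 1)),
       (if n = 0 then false else pvBF S ((n : Int) - 1))) := by
  induction n with
  | zero =>
    norm_num [PySem.List.pyRange_one_eq_nil, pvCnt]
  | succ m ih =>
    have h1 : ((m+1:Nat):Int) = (m:Int)+1 := by push_cast; ring
    rw [h1, PySem.List.pyRange_one_succ_right (Int.natCast_nonneg m), List.foldl_append, ih]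
    simp only [List.foldl_cons, List.foldl_nil, pv_contains_ofList]
    rw [pvCnt_succ]
    simp [pvTF, pvBF]

lemma pv_B_val (K : Int) (S : List Int) :
    seating_students_alt (K :: S) = pvCnt S (PySem.Int.floordiv K 2) := by
  simp only [seating_students_alt]
  by_cases h : 0 ≤ PySem.Int.floordiv K 2
  · obtain ⟨n, hn⟩ : ∃ n : Nat, (n:Int) = PySem.Int.floordiv K 2 :=
      ⟨(PySem.Int.floordiv K 2).toNat, Int.toNat_of_nonneg h⟩
    rw [← hn, pv_B_inv]
  · rw [PySem.List.pyRange_one_eq_nil (by omega)]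
    unfold pvCnt
    rw [PySem.List.pyRange_one_eq_nil (by omega), PySem.List.pyRange_one_eq_nil (by omega)]
    simp

-- ===== VERDICT (by name: the statement is the Claim_ definition above) =====
theorem seating_students_spec : Claim_equal_seating_students := by
  intro lst _ hpre
  cases lst with
  | nil => exact absurd rfl hpre
  | cons K S => unfold Spec_seating_students; rw [pv_A_val, pv_B_val]
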